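-- pv_equiv track=rewrite | github.com/JakKepka/FuzzyClusteringAlgorithms | libraries/valid_data.py | most_frequent_in_segments
-- ===== SOURCE A (Python) =====
-- from collections import Counter
--
-- def most_frequent_in_segments(array, segment_length=100):
--     # Sprawdzenie czy tablica ma odpowiedni rozmiar
--     if len(array) % segment_length != 0:
--         raise ValueError(f"Array length must be a multiple of {segment_length}.")
--
--     # Podział tablicy na segmenty
--     segments = [array[i:i + segment_length] for i in range(0, len(array), segment_length)]
--
--     # Przechowywanie wyników
--     results = []
--
--     for segment in segments:
--         # Znajdź najczęściej występującą wartość i jej liczbę wystąpień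
--         counter = Counter(segment)
--         most_common_value, count = counter.most_common(1)[0]
--         results.append((most_common_value, count))
--
--     return results
-- ===== SOURCE B (Python) =====
-- def most_frequent_in_segments(array, segment_length=100):
--     if len(array) % segment_length != 0:
--         raise ValueError(f"Array length must be a multiple of {segment_length}.")
--
--     results = []
--     for start in range(0, len(array), segment_length):
--         segment = array[start:start + segment_length]
--         # brute force: recount each element's frequency by scanning the segment;
--         # strict '>' keeps the earliest element whose count is maximal, which is
--         # exactly Counter.most_common(1)'s first-inserted-wins tie-break
--         best = None
--         for v in segment:
--             c = segment.count(v)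
--             if best is None or c > best[1]:
--                 best = (v, c)
--         results.append(best)
--     return results
-- ===== Notes on version B (the rewrite author's own statement) =====
-- stated objective: alternative
-- what changed: Replaces hash-based counting (collections.Counter plus most_common(1)) by a comparison-based brute force: for each segment element its frequency is recomputed by scanning the segment with list.count, and a running best is kept under a strict '>' update, whose first-maximal-element behaviour reproduces most_common(1)'s tie-break without any dictionary.
import Mathlib
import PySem

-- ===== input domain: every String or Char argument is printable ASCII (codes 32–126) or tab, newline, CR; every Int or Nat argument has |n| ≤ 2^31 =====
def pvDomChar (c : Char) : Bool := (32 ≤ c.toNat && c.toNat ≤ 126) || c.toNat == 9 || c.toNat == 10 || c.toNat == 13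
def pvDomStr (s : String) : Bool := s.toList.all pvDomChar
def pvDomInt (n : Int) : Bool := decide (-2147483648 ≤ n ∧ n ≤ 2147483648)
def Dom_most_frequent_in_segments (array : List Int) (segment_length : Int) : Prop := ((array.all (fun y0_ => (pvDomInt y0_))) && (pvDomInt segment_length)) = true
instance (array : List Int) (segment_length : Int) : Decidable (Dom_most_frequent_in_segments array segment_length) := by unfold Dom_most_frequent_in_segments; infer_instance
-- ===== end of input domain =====

-- B replaces hash counting (Counter + most_common(1)) by a comparison-only brute force: each
-- element's frequency is recomputed by scanning its segment (list.count) and a strict-'>' running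
-- best keeps the first count-maximal element (alternative algorithm, no dictionary).


-- ===== PORT A =====
-- The guard `if len(array) % segment_length != 0: raise ValueError` (and ZeroDivisionError for
-- segment_length == 0) is excluded by Pre_; on admitted inputs it is a no-op.
-- `counter.most_common(1)[0]` = first item of the counter's items sorted by count descending
-- (stable sort); its IndexError on an empty segment is unreachable on admitted inputs.
def most_frequent_in_segments (array : List Int) (segment_length : Int) : List (Int × Int) :=
  let segments := (PySem.List.pyRange 0 (PySem.List.len array) segment_length).map
    (fun i => PySem.List.slice array (some i) (some (i + segment_length)))
  segments.foldl (fun results segment =>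
    let counter := PySem.Dict.counter segment
    match (PySem.List.sorted counter.items (fun kv => kv.2) true).head? with
    | some p => results ++ [p]
    | none => results) []

-- ===== PORT B =====
-- inner loop of Source B: `c = segment.count(v)` then `if best is None or c > best[1]`.
def pvBestOf (segment : List Int) : Option (Int × Int) :=
  segment.foldl (fun best v =>
    let c : Int := (PySem.List.count segment v : Int)
    match best with
    | none => some (v, c)
    | some b => if b.2 < c then some (v, c) else some b) none
-- `results.append(best)`: best is None only on an empty segment, which no admitted input produces
-- (there Python would append None, outside the declared return type); that branch appends nothing.
def most_frequent_in_segments_alt (array : List Int) (segment_length : Int) : List (Int × Int) :=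
  (PySem.List.pyRange 0 (PySem.List.len array) segment_length).foldl
    (fun results start =>
      let segment := PySem.List.slice array (some start) (some (start + segment_length))
      match pvBestOf segment with
      | some p => results ++ [p]
      | none => results) []

-- ===== PRECONDITION & SPEC =====
-- Pre_ excludes exactly the raising inputs: segment_length = 0 (ZeroDivisionError in the guard)
-- and array lengths with len(array) % segment_length != 0 (ValueError).
def Pre_most_frequent_in_segments (array : List Int) (segment_length : Int) : Prop :=
  segment_length ≠ 0 ∧ PySem.Int.mod (PySem.List.len array) segment_length = 0
instance (array : List Int) (segment_length : Int) : Decidable (Pre_most_frequent_in_segments array segment_length) := by unfold Pre_most_frequent_in_segments; infer_instance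

def pvWitness_most_frequent_in_segments : List Int × Int := ([1, 2, 2, 3], 2)

def Spec_most_frequent_in_segments (array : List Int) (segment_length : Int) (out : List (Int × Int)) : Prop := out = most_frequent_in_segments_alt array segment_length
instance (array : List Int) (segment_length : Int) (out : List (Int × Int)) : Decidable (Spec_most_frequent_in_segments array segment_length out) := by unfold Spec_most_frequent_in_segments; infer_instance

-- ===== CLAIM (what is proved, stated in full; the proofs are below) =====
def Claim_equal_most_frequent_in_segments : Prop := ∀ (array : List Int) (segment_length : Int), Dom_most_frequent_in_segments array segment_length → Pre_most_frequent_in_segments array segment_length → Spec_most_frequent_in_segments array segment_length (most_frequent_in_segments array segment_length)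

-- ===== LEMMAS AND PROOFS =====

lemma pv_insertBy_head? {α : Type} (key : α → Int) (x : α) (acc : List α) :
    (PySem.List.insertBy (fun a b => decide (key b < key a)) x acc).head? =
      (match acc.head? with
       | none => some x
       | some m => if key m < key x then some x else some m) := by
  cases acc with
  | nil => rfl
  | cons m t =>
      by_cases h : key m < key x <;> simp [PySem.List.insertBy, h]

lemma pv_foldl_insertBy_head? {α : Type} (key : α → Int) :
    ∀ (xs acc : List α),
      (xs.foldl (fun acc x => PySem.List.insertBy (fun a b => decide (key b < key a)) x acc) acc).head? =
        xs.foldl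
          (fun o x =>
            match o with
            | none => some x
            | some m => if key m < key x then some x else some m)
          acc.head? := by
  intro xs
  induction xs with
  | nil => intro acc; rfl
  | cons x t ih =>
      intro acc
      rw [List.foldl_cons, List.foldl_cons, ih, pv_insertBy_head?]

-- head of the stable reverse sort = Python max (first extremal element)
lemma pv_head?_sorted_rev {α : Type} (key : α → Int) (xs : List α) :
    (PySem.List.sorted xs key true).head? = PySem.List.max? xs key := by
  rw [PySem.List.sorted_rev_eq_foldl_insertBy, pv_foldl_insertBy_head?]
  rfl

lemma pv_max?_append_singleton {α : Type} (key : α → Int) (ys : List α) (y : α) :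
    PySem.List.max? (ys ++ [y]) key =
      (match PySem.List.max? ys key with
       | none => some y
       | some m => if key m < key y then some y else some m) := by
  unfold PySem.List.max?
  rw [List.foldl_append]
  rfl

-- first count-maximal element over the full list = over its ordered distinct elements
lemma pv_max?_dedup (k : Int → Int) (xs : List Int) :
    PySem.List.max? (xs.map (fun v => (v, k v))) (fun kv => kv.2) =
      PySem.List.max? ((PySem.Set.ofList xs).map (fun v => (v, k v))) (fun kv => kv.2) := by
  induction xs using List.reverseRecOn with
  | nil => rfl
  | append_singleton xs x ih =>
      rw [PySem.Set.ofList_append_singleton, List.map_append]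
      simp only [List.map_cons, List.map_nil]
      rw [pv_max?_append_singleton, ih]
      by_cases hx : x ∈ PySem.Set.ofList xs
      · rw [PySem.Set.add_of_mem hx]
        have hxm : ((x, k x) : Int × Int) ∈ (PySem.Set.ofList xs).map (fun v => (v, k v)) :=
          List.mem_map_of_mem hx
        cases h : PySem.List.max? ((PySem.Set.ofList xs).map (fun v => (v, k v))) (fun kv => kv.2) with
        | none =>
            exfalso
            rw [PySem.List.max?_eq_none_iff] at h
            rw [h] at hxm
            exact (List.not_mem_nil) hxm
        | some m =>
            have hle : k x ≤ m.2 := PySem.List.max?_isMax h _ hxm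
            have : ¬ m.2 < k x := not_lt.mpr hle
            simp [this]
      · rw [PySem.Set.add_of_not_mem hx, List.map_append]
        simp only [List.map_cons, List.map_nil]
        rw [pv_max?_append_singleton]

-- per-segment agreement: A's `sorted-by-count head` equals B's brute-force scan
lemma pv_best_eq (seg : List Int) :
    (PySem.List.sorted (PySem.Dict.counter seg).items (fun kv => kv.2) true).head? =
      pvBestOf seg := by
  rw [pv_head?_sorted_rev, PySem.Dict.items_counter,
      ← pv_max?_dedup (fun v => ((List.count v seg : Nat) : Int)) seg]
  unfold PySem.List.max? pvBestOf
  rw [List.foldl_map]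
  congr 1
  funext best v
  cases best <;> simp [PySem.List.count]

-- ===== VERDICT (by name: the statement is the Claim_ definition above) =====
theorem most_frequent_in_segments_spec : Claim_equal_most_frequent_in_segments := by
  intro arr s _ _
  unfold Spec_most_frequent_in_segments
  unfold most_frequent_in_segments most_frequent_in_segments_alt
  rw [List.foldl_map]
  congr 1
  funext r i
  simp only []
  rw [pv_best_eq]
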